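-- pv_equiv track=rewrite | github.com/untangle/ngfw_pkgs | sync/openwrt/network_manager.py | find_lowest_available_tun
-- ===== SOURCE A (Python) =====
-- def find_lowest_available_tun(interfaces):
--     """
--     This loops throught the specified interfaces
--     and finds the lowest available unused tunX device
--     If no other tun devices exists tun0 is returned
--     """
--     available = list(range(0, 255))
--     for intf in interfaces:
--         if intf.get("device") is not None and intf.get("device").startswith("tun"):
--             dev = intf["device"].replace("tun", "")
--             try:
--                 available.remove(int(dev))
--             except ValueError:
--                 raise Exception("Invalid tun interface: " + intf["device"])
--     if not available:
--         raise Exception("No available tun interfaces")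
--     else:
--         return "tun" + str(available[0])
-- ===== SOURCE B (Python) =====
-- def find_lowest_available_tun(interfaces):
--     """
--     Collect the tunX numbers already taken into a set in one pass,
--     then return the first free number in range(255).
--     """
--     used = set()
--     for intf in interfaces:
--         dev = intf.get("device")
--         if dev is not None and dev.startswith("tun"):
--             used.add(int(dev.replace("tun", "")))
--     for i in range(255):
--         if i not in used:
--             return "tun" + str(i)
--     raise Exception("No available tun interfaces")
-- ===== Notes on version B (the rewrite author's own statement) =====
-- stated objective: alternative
-- what changed: Instead of materialising a 255-element availability list mutated by list.remove (a linear scan per interface), B builds a `used` set in one pass and then returns the first number in range(255) missing from the set; Pre_ excludes exactly the inputs on which A raises (a non-integer tun suffix, a duplicate or out-of-range tun number, or all 255 numbers taken).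
import Mathlib
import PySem

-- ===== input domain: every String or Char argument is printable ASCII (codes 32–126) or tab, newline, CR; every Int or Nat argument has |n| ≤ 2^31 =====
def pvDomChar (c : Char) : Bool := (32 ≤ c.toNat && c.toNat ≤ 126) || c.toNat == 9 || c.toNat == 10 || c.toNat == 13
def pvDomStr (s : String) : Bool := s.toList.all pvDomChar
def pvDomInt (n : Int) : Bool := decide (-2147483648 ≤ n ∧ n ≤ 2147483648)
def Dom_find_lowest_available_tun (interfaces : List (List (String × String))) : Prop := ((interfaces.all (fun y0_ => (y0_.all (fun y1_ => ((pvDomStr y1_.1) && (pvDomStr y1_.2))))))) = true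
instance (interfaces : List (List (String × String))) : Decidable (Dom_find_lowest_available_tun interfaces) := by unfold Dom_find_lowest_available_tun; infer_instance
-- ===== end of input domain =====

-- B replaces A's 255-element availability list mutated by list.remove with a one-pass
-- `used` set followed by a scan for the first free number (objective: alternative).
-- Both ports return "" on the paths where their Python raises; Pre_ excludes A's raise paths.

-- ===== PORT A =====
-- the for-loop over interfaces, carrying the `available` list; `none` = the raise path
def findA_loop : List (List (String × String)) → List Int → Option (List Int)
  | [], avail => some avail
  | intf :: rest, avail =>
    match intf.lookup "device" with
    | some dev =>
      if PySem.Str.startswith dev "tun" then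
        match PySem.Int.ofStr? (PySem.Str.replace dev "tun" "") with
        | some n =>
          match PySem.List.remove? avail n with
          | some avail' => findA_loop rest avail'
          | none => none -- raise Exception("Invalid tun interface: ...")  (ValueError from remove)
        | none => none  -- raise Exception("Invalid tun interface: ...")  (ValueError from int)
      else findA_loop rest avail
    | none => findA_loop rest avail

def find_lowest_available_tun (interfaces : List (List (String × String))) : String :=
  match findA_loop interfaces (PySem.List.pyRange 0 255 1) with
  | none => ""        -- raise Exception("Invalid tun interface: ...")
  | some [] => ""     -- raise Exception("No available tun interfaces")
  | some (a :: _) => "tun" ++ PySem.Int.toStr a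

-- ===== PORT B =====
-- the for-loop over interfaces, collecting taken numbers into `used`; `none` = int() raising
def findB_used : List (List (String × String)) → PySem.Set Int → Option (PySem.Set Int)
  | [], used => some used
  | intf :: rest, used =>
    match intf.lookup "device" with
    | some dev =>
      if PySem.Str.startswith dev "tun" then
        match PySem.Int.ofStr? (PySem.Str.replace dev "tun" "") with
        | some n => findB_used rest (PySem.Set.add used n)
        | none => none -- ValueError from int()
      else findB_used rest used
    | none => findB_used rest used

-- the final `for i in range(255)` scan; "" = raise Exception("No available tun interfaces")
def findB_first : List Int → PySem.Set Int → String
  | [], _ => ""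
  | i :: rest, used =>
    if PySem.Set.contains used i then findB_first rest used
    else "tun" ++ PySem.Int.toStr i

def find_lowest_available_tun_alt (interfaces : List (List (String × String))) : String :=
  match findB_used interfaces PySem.Set.empty with
  | none => ""
  | some used => findB_first (PySem.List.pyRange 0 255 1) used

-- ===== PRECONDITION & SPEC =====
-- the parse results of the 'tun…' device fields, in order (used only to state Pre_)
def tunTokens (interfaces : List (List (String × String))) : List (Option Int) :=
  interfaces.filterMap (fun intf =>
    match intf.lookup "device" with
    | some dev =>
      if PySem.Str.startswith dev "tun" then
        some (PySem.Int.ofStr? (PySem.Str.replace dev "tun" ""))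
      else none
    | none => none)

-- Pre_ = exactly the inputs on which the Python A returns (no exception): every 'tun…'
-- device suffix parses as an int in [0,255), the parsed numbers are pairwise distinct
-- (a duplicate makes list.remove raise), and fewer than 255 of them occur (otherwise
-- "No available tun interfaces" is raised).
def Pre_find_lowest_available_tun (interfaces : List (List (String × String))) : Prop :=
  ((tunTokens interfaces).all (fun o =>
      match o with
      | some n => decide (0 ≤ n) && decide (n < 255)
      | none => false)) = true
  ∧ (tunTokens interfaces).Nodup ∧ (tunTokens interfaces).length < 255
instance (interfaces : List (List (String × String))) : Decidable (Pre_find_lowest_available_tun interfaces) := by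
  unfold Pre_find_lowest_available_tun; infer_instance

def pvWitness_find_lowest_available_tun : (List (List (String × String))) :=
  [[("device", "tun0")], [("name", "lan")], [("device", "tun3")]]

def Spec_find_lowest_available_tun (interfaces : List (List (String × String))) (out : String) : Prop := out = find_lowest_available_tun_alt interfaces
instance (interfaces : List (List (String × String))) (out : String) : Decidable (Spec_find_lowest_available_tun interfaces out) := by unfold Spec_find_lowest_available_tun; infer_instance

-- ===== CLAIM (what is proved, stated in full; the proofs are below) =====
def Claim_equal_find_lowest_available_tun : Prop := ∀ (interfaces : List (List (String × String))), Dom_find_lowest_available_tun interfaces → Pre_find_lowest_available_tun interfaces → Spec_find_lowest_available_tun interfaces (find_lowest_available_tun interfaces)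


-- ===== LEMMAS AND PROOFS =====

theorem remove_filter (s : PySem.Set Int) (n : Int) (hns : n ∉ s) :
    ∀ l : List Int, l.Nodup → n ∈ l →
    PySem.List.remove? (l.filter (fun x => !PySem.Set.contains s x)) n
      = some (l.filter (fun x => !PySem.Set.contains (PySem.Set.add s n) x)) := by
  intro l
  induction l with
  | nil => simp
  | cons a t ih =>
    intro hnd hmem
    have hndt : t.Nodup := hnd.of_cons
    rw [List.filter_cons, List.filter_cons]
    by_cases han : a = n
    · subst han
      have hat : a ∉ t := (List.nodup_cons.mp hnd).1
      rw [if_pos (by simp [hns]), if_neg (by simp [PySem.Set.mem_add]),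
        PySem.List.remove?_cons_self]
      congr 1
      apply List.filter_congr
      intro x hx
      have hxa : x ≠ a := fun h => hat (h ▸ hx)
      simp [PySem.Set.mem_add, hxa]
    · have hnt : n ∈ t := (List.mem_cons.mp hmem).resolve_left (fun h => han h.symm)
      by_cases has : a ∈ s
      · rw [if_neg (by simp [has]), if_neg (by simp [PySem.Set.mem_add, has])]
        exact ih hndt hnt
      · rw [if_pos (by simp [has]), if_pos (by simp [PySem.Set.mem_add, has, han]),
          PySem.List.remove?_cons_of_ne _ han, ih hndt hnt]
        rfl

theorem loop_rel : ∀ (interfaces : List (List (String × String))) (used : PySem.Set Int),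
    (∀ o ∈ tunTokens interfaces, ∃ n, o = some n ∧ 0 ≤ n ∧ n < 255 ∧ n ∉ used) →
    (tunTokens interfaces).Nodup →
    findA_loop interfaces ((PySem.List.pyRange 0 255 1).filter (fun x => !PySem.Set.contains used x))
      = (findB_used interfaces used).map
          (fun u => (PySem.List.pyRange 0 255 1).filter (fun x => !PySem.Set.contains u x)) := by
  intro interfaces
  induction interfaces with
  | nil => intro used _ _; rfl
  | cons intf rest ih =>
    intro used hok hnd
    simp only [findA_loop, findB_used]
    cases hdev : intf.lookup "device" with
    | none =>
      have htoks : tunTokens (intf :: rest) = tunTokens rest := by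
        simp [tunTokens, hdev]
      rw [htoks] at hok hnd
      exact ih used hok hnd
    | some dev =>
      by_cases hs : PySem.Str.startswith dev "tun" = true
      · have hs' : PySem.Chars.startswith dev.toList ['t', 'u', 'n'] = true := by
          simpa [PySem.Str.startswith] using hs
        simp only [hs, if_true]
        have htoks : tunTokens (intf :: rest)
            = PySem.Int.ofStr? (PySem.Str.replace dev "tun" "") :: tunTokens rest := by
          simp [tunTokens, hdev, hs']
        rw [htoks] at hok hnd
        obtain ⟨n, hn, h0, h1, h2⟩ := hok _ (List.mem_cons_self)
        rw [hn]
        dsimp only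
        have hmem : n ∈ PySem.List.pyRange 0 255 1 :=
          (PySem.List.mem_pyRange_one).mpr ⟨h0, h1⟩
        rw [remove_filter used n h2 _ (PySem.List.nodup_pyRange_one 0 255) hmem]
        apply ih (PySem.Set.add used n)
        · intro o ho
          obtain ⟨n', hn', h0', h1', h2'⟩ := hok o (List.mem_cons_of_mem _ ho)
          refine ⟨n', hn', h0', h1', ?_⟩
          rw [PySem.Set.mem_add]
          rintro (h | h)
          · exact h2' h
          · subst h
            exact (List.nodup_cons.mp (hn ▸ hnd)).1 (hn' ▸ ho)
        · exact hnd.of_cons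
      · have hs' : ¬ PySem.Chars.startswith dev.toList ['t', 'u', 'n'] = true := by
          simpa [PySem.Str.startswith] using hs
        simp only [hs, Bool.false_eq_true, if_false]
        have htoks : tunTokens (intf :: rest) = tunTokens rest := by
          simp [tunTokens, hdev, hs']
        rw [htoks] at hok hnd
        exact ih used hok hnd

theorem first_filter (used : PySem.Set Int) : ∀ (l : List Int),
    findB_first l used
      = match l.filter (fun x => !PySem.Set.contains used x) with
        | [] => ""
        | a :: _ => "tun" ++ PySem.Int.toStr a := by
  intro l
  induction l with
  | nil => rfl
  | cons a t ih =>
    rw [List.filter_cons]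
    simp only [findB_first]
    by_cases h : PySem.Set.contains used a = true
    · rw [if_pos h, if_neg (by simpa using h)]
      exact ih
    · rw [if_neg h, if_pos (by simpa using h)]

-- ===== VERDICT (by name: the statement is the Claim_ definition above) =====
theorem find_lowest_available_tun_spec : Claim_equal_find_lowest_available_tun := by
  intro interfaces _dom pre
  obtain ⟨hall, hnd, _⟩ := pre
  unfold Spec_find_lowest_available_tun find_lowest_available_tun find_lowest_available_tun_alt
  have h0 : (PySem.List.pyRange 0 255 1).filter (fun x => !PySem.Set.contains PySem.Set.empty x)
      = PySem.List.pyRange 0 255 1 := by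
    simp [PySem.Set.empty, PySem.Set.contains]
  have hok : ∀ o ∈ tunTokens interfaces, ∃ n, o = some n ∧ 0 ≤ n ∧ n < 255 ∧ n ∉ (PySem.Set.empty : PySem.Set Int) := by
    intro o ho
    have := List.all_eq_true.mp hall o ho
    cases o with
    | none => simp at this
    | some n =>
      obtain ⟨h0, h1⟩ : 0 ≤ n ∧ n < 255 := by simpa using this
      exact ⟨n, rfl, h0, h1, by simp [PySem.Set.empty]⟩
  have key := loop_rel interfaces PySem.Set.empty hok hnd
  rw [h0] at key
  rw [key]
  cases hB : findB_used interfaces PySem.Set.empty with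
  | none => rfl
  | some u =>
    simp only [Option.map_some]
    rw [first_filter u (PySem.List.pyRange 0 255 1)]
    cases (PySem.List.pyRange 0 255 1).filter (fun x => !PySem.Set.contains u x) <;> rfl
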